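-- pv_equiv track=rewrite | github.com/prateekmehta/codepractices | city_triplet.py | create_triplets
-- ===== SOURCE A (Python) =====
-- def create_triplets(l):
--     if len(l) < 3:
--         return
--     result = []
--     for i in range(0,len(l)-2):
--         triplet = []
--         triplet.append(l[i][0])
--         triplet.append(l[i+1][0])
--         triplet.append(l[i+2][0])
--         result.append(triplet)
--     return result
-- ===== SOURCE B (Python) =====
-- def create_triplets(l):
--     if len(l) < 3:
--         return
--     result = []
--     window = []
--     for row in l:
--         window.append(row[0])
--         if len(window) == 3:
--             result.append(window[:])
--             window.pop(0)
--     return result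
-- ===== Notes on version B (the rewrite author's own statement) =====
-- stated objective: alternative
-- what changed: Replaces A's index-arithmetic loop over range(len(l)-2) with three lookaheads per step by a single streaming pass that maintains an explicit 3-element sliding-window buffer (append the row's first field, emit a copy when the buffer fills, pop its head), touching each row exactly once with no index arithmetic.
import Mathlib
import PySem

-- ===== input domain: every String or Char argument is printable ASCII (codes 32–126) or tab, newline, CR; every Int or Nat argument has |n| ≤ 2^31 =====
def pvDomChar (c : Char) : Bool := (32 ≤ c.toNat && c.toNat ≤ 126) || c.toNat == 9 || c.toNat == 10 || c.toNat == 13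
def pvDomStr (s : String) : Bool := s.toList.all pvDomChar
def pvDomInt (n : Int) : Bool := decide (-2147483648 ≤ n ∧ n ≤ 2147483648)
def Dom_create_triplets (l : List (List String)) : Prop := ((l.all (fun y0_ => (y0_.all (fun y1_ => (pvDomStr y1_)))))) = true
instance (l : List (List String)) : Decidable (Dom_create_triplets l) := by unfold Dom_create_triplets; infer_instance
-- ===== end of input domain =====

-- B replaces A's index-arithmetic loop by a single streaming pass that maintains an explicit 3-element sliding-window buffer (alternative decomposition, same cost).


-- ===== PORT A =====
def create_triplets (l : List (List String)) : Option (List (List String)) :=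
  if l.length < 3 then none
  else
    some ((PySem.List.pyRange 0 ((l.length : Int) - 2) 1).foldl
      (fun result i =>
        let triplet : List String := []
        let triplet := triplet ++ [PySem.List.pyGetD (PySem.List.pyGetD l i []) 0 ""]
        let triplet := triplet ++ [PySem.List.pyGetD (PySem.List.pyGetD l (i+1) []) 0 ""]
        let triplet := triplet ++ [PySem.List.pyGetD (PySem.List.pyGetD l (i+2) []) 0 ""]
        result ++ [triplet]) [])

-- ===== PORT B =====
-- streaming pass: state = (result, window); append row's first field, emit a copy when the window fills, drop its head
def create_triplets_alt (l : List (List String)) : Option (List (List String)) :=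
  if l.length < 3 then none
  else
    some ((l.foldl
      (fun (s : List (List String) × List String) row =>
        let window := s.2 ++ [PySem.List.pyGetD row 0 ""]
        if window.length == 3 then (s.1 ++ [window], window.drop 1)
        else (s.1, window)) ([], [])).1)

-- ===== PRECONDITION & SPEC =====
-- Pre_ excludes exactly the inputs where Python A raises IndexError: length ≥ 3 with some empty inner list (B raises there too).
def Pre_create_triplets (l : List (List String)) : Prop :=
  l.length < 3 ∨ (l.all (fun x => !x.isEmpty)) = true
instance (l : List (List String)) : Decidable (Pre_create_triplets l) := by
  unfold Pre_create_triplets; infer_instance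
def pvWitness_create_triplets : List (List String) := [["a"], ["b", "z"], ["c"], ["d"]]
def Spec_create_triplets (l : List (List String)) (out : Option (List (List String))) : Prop := out = create_triplets_alt l
instance (l : List (List String)) (out : Option (List (List String))) : Decidable (Spec_create_triplets l out) := by unfold Spec_create_triplets; infer_instance

-- ===== CLAIM (what is proved, stated in full; the proofs are below) =====
def Claim_equal_create_triplets : Prop := ∀ (l : List (List String)), Dom_create_triplets l → Pre_create_triplets l → Spec_create_triplets l (create_triplets l)

-- ===== LEMMAS AND PROOFS =====

-- proof helper: all consecutive length-3 windows of a list (structural recursion)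
def trip : List String → List (List String)
  | a :: rest@(b :: c :: _) => [a, b, c] :: trip rest
  | _ => []

lemma trip_cons (a b c : String) (t : List String) :
    trip (a :: b :: c :: t) = [a, b, c] :: trip (b :: c :: t) := by simp [trip]

lemma trip_short (w : List String) (h : w.length ≤ 2) : trip w = [] := by
  match w with
  | [] => simp [trip]
  | [_] => simp [trip]
  | [_, _] => simp [trip]
  | _ :: _ :: _ :: _ => simp at h

-- B's loop body (proof-side name for the port's lambda)
def stepB (s : List (List String) × List String) (row : List String) :
    List (List String) × List String :=
  let window := s.2 ++ [PySem.List.pyGetD row 0 ""]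
  if window.length == 3 then (s.1 ++ [window], window.drop 1)
  else (s.1, window)

-- B's fold invariant: with a window of length ≤ 2, the emitted triplets are exactly
-- the consecutive windows of (window ++ first-fields of the remaining rows).
lemma foldB (xs : List (List String)) :
    ∀ (res : List (List String)) (w : List String), w.length ≤ 2 →
    (xs.foldl stepB (res, w)).1
      = res ++ trip (w ++ xs.map (fun x => PySem.List.pyGetD x 0 "")) := by
  induction xs with
  | nil => intro res w h; simp [trip_short w h]
  | cons r rest ih =>
    intro res w h
    rw [List.foldl_cons, List.map_cons]
    by_cases h2 : w.length = 2
    · obtain ⟨a, b, hw⟩ : ∃ a b, w = [a, b] := by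
        match w, h2 with | [a, b], _ => exact ⟨a, b, rfl⟩
      subst hw
      have hstep : stepB (res, [a, b]) r
          = (res ++ [[a, b, PySem.List.pyGetD r 0 ""]], [b, PySem.List.pyGetD r 0 ""]) := by
        unfold stepB; rw [if_pos (by simp)]; simp
      rw [hstep, ih _ _ (by simp)]
      simp [trip_cons]
    · have hne : ¬ (((w ++ [PySem.List.pyGetD r 0 ""]).length == 3) = true) := by
        simp; omega
      have hstep : stepB (res, w) r = (res, w ++ [PySem.List.pyGetD r 0 ""]) := by
        unfold stepB; rw [if_neg hne]
      rw [hstep, ih _ _ (by simp; omega)]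
      simp

lemma trip_getD (fs : List String) :
    trip fs = (List.range (fs.length - 2)).map
      (fun k => [fs.getD k "", fs.getD (k+1) "", fs.getD (k+2) ""]) := by
  match fs with
  | [] => simp [trip]
  | [_] => simp [trip]
  | [_, _] => simp [trip]
  | a :: b :: c :: t =>
    have ih := trip_getD (b :: c :: t)
    rw [trip_cons, ih]
    have hlen : (a :: b :: c :: t).length - 2 = ((b :: c :: t).length - 2) + 1 := by
      simp
    rw [hlen, List.range_succ_eq_map, List.map_cons, List.map_map]
    congr 1

-- ===== VERDICT (by name: the statement is the Claim_ definition above) =====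
theorem create_triplets_spec : Claim_equal_create_triplets := by
  intro l _ _
  unfold Spec_create_triplets create_triplets create_triplets_alt
  by_cases h : l.length < 3
  · simp [h]
  · simp only [h, if_neg, not_false_iff]
    have hfun : (l.foldl
      (fun (s : List (List String) × List String) row =>
        let window := s.2 ++ [PySem.List.pyGetD row 0 ""]
        if window.length == 3 then (s.1 ++ [window], window.drop 1)
        else (s.1, window)) ([], [])) = l.foldl stepB ([], []) := rfl
    rw [hfun, foldB l [] [] (by simp)]
    rw [PySem.List.foldl_append_singleton_eq_map
      (f := fun i => ([] : List String) ++ [PySem.List.pyGetD (PySem.List.pyGetD l i []) 0 ""]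
        ++ [PySem.List.pyGetD (PySem.List.pyGetD l (i+1) []) 0 ""]
        ++ [PySem.List.pyGetD (PySem.List.pyGetD l (i+2) []) 0 ""])]
    simp only [List.nil_append]
    rw [trip_getD]
    congr 1
    apply List.ext_getElem
    · simp [PySem.List.length_pyRange_one]
      omega
    · intro k hk1 hk2
      have hk : k < l.length - 2 := by
        simp [PySem.List.length_pyRange_one] at hk1
        omega
      simp only [List.getElem_map, PySem.List.getElem_pyRange_one,
        List.getElem_range, zero_add]
      have e1 : (k : Int) + 1 = ((k + 1 : Nat) : Int) := by push_cast; ring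
      have e2 : (k : Int) + 2 = ((k + 2 : Nat) : Int) := by push_cast; ring
      rw [e1, e2, PySem.List.pyGetD_natCast, PySem.List.pyGetD_natCast,
        PySem.List.pyGetD_natCast]
      rw [List.getD_eq_getElem l [] (by omega), List.getD_eq_getElem l [] (by omega),
        List.getD_eq_getElem l [] (by omega)]
      rw [List.getD_eq_getElem _ "" (by simp; omega), List.getD_eq_getElem _ "" (by simp; omega),
        List.getD_eq_getElem _ "" (by simp; omega)]
      simp
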